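-- pv_equiv track=rewrite | github.com/yofn/pyacm | codeforces/math数学/900/1016A死亡笔记.py | f
-- ===== SOURCE A (Python) =====
-- def f(l,m):
--     n = len(l)
--     for i in range(1,n):
--         l[i] += l[i-1]
--     bl = [x//m for x in l]
--     for i in range(n-1,0,-1):
--         bl[i]-= bl[i-1]
--     return bl
-- ===== SOURCE B (Python) =====
-- def f(l, m):
--     # Carry only the running remainder of the prefix sum modulo m; each output
--     # element is (r + x) // m directly, by (q*m + r + x)//m - q = (r + x)//m.
--     # No prefix-sum array and no quotient differencing are ever formed.
--     # (A rewrites l into its prefix sums in place; B leaves l untouched --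
--     # the equivalence is about the return value only.)
--     out = []
--     r = 0
--     for x in l:
--         t = r + x
--         out.append(t // m)
--         r = t % m
--     return out
-- ===== Notes on version B (the rewrite author's own statement) =====
-- stated objective: alternative
-- what changed: A builds the full prefix-sum array, floor-divides every prefix sum by m, and then differences the quotients backward; B never forms prefix sums or quotient differences at all: it carries only the running remainder r of the prefix sum modulo m and emits (r+x)//m for each element, correct by (q*m+r+x)//m = q + (r+x)//m. A also mutates l into its prefix sums in place; B leaves l untouched (return-value equivalence).
import Mathlib
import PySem

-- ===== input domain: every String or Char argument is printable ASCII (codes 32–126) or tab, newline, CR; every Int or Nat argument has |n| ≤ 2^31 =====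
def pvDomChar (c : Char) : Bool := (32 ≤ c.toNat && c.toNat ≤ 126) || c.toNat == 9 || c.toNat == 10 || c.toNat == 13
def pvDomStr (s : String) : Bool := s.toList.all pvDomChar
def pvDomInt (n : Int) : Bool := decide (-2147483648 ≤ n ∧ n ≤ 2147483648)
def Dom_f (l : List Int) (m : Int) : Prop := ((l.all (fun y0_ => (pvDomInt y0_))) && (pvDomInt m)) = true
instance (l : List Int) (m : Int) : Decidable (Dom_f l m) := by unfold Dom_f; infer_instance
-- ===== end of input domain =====

-- B replaces A's prefix-sum/quotient-difference scheme with a remainder-carrying pass (alternative algorithm, same O(n) cost).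
-- A mutates l into its prefix sums in place; B does not: the equivalence proved here is about the return value only.

-- ===== PORT A =====
-- loop `for i in range(1,n): l[i] += l[i-1]`: each later cell adds the updated previous cell
def fPrefixGo (p : Int) : List Int → List Int
  | [] => []
  | y :: ys => (p + y) :: fPrefixGo (p + y) ys

def fPrefix : List Int → List Int
  | [] => []
  | x :: xs => x :: fPrefixGo x xs

-- loop `for i in range(n-1,0,-1): bl[i] -= bl[i-1]`: each cell i ≥ 1 gets bl[i] - bl[i-1]
-- (the backward order means bl[i-1] is still the original value when cell i is updated)
def fDiffGo (p : Int) : List Int → List Int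
  | [] => []
  | y :: ys => (y - p) :: fDiffGo y ys

def fDiff : List Int → List Int
  | [] => []
  | b :: bs => b :: fDiffGo b bs

def f (l : List Int) (m : Int) : List Int :=
  fDiff ((fPrefix l).map (fun x => PySem.Int.floordiv x m))

-- ===== PORT B =====
-- remainder-carrying pass: r is the running prefix sum modulo m; emit (r+x)//m, keep (r+x)%m
def fAltGo (m r : Int) : List Int → List Int
  | [] => []
  | x :: xs =>
      let t := r + x
      PySem.Int.floordiv t m :: fAltGo m (PySem.Int.mod t m) xs

def f_alt (l : List Int) (m : Int) : List Int := fAltGo m 0 l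

-- ===== PRECONDITION & SPEC =====
-- Python raises ZeroDivisionError when m = 0 and l is nonempty (the comprehension evaluates x//m); B raises there too
def Pre_f (l : List Int) (m : Int) : Prop := l = [] ∨ m ≠ 0
instance (l : List Int) (m : Int) : Decidable (Pre_f l m) := by unfold Pre_f; infer_instance

def pvWitness_f : List Int × Int := ([3, 1, 4, 1, 5], 2)

def Spec_f (l : List Int) (m : Int) (out : List Int) : Prop := out = f_alt l m
instance (l : List Int) (m : Int) (out : List Int) : Decidable (Spec_f l m out) := by unfold Spec_f; infer_instance

-- ===== CLAIM (what is proved, stated in full; the proofs are below) =====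
def Claim_equal_f : Prop := ∀ (l : List Int) (m : Int), Dom_f l m → Pre_f l m → Spec_f l m (f l m)

-- ===== LEMMAS AND PROOFS =====
-- write s = (s.fdiv m) * m + s.fmod m and shift the multiple of m out of both fdiv and fmod
theorem fdiv_shift (s y m : Int) (hm : m ≠ 0) :
    (s + y).fdiv m - s.fdiv m = (s.fmod m + y).fdiv m := by
  have h : s + y = (s.fmod m + y) + m * s.fdiv m := by
    have := Int.fmod_add_fdiv s m; linarith
  rw [h, Int.add_mul_fdiv_left _ _ hm]; ring

theorem fmod_shift (s y m : Int) :
    (s + y).fmod m = (s.fmod m + y).fmod m := by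
  have h : s + y = (s.fmod m + y) + m * s.fdiv m := by
    have := Int.fmod_add_fdiv s m; linarith
  rw [h, Int.add_mul_fmod_self_left]

theorem f_go_eq (m : Int) (hm : m ≠ 0) (xs : List Int) : ∀ s : Int,
    fDiffGo (PySem.Int.floordiv s m) ((fPrefixGo s xs).map (fun x => PySem.Int.floordiv x m))
      = fAltGo m (PySem.Int.mod s m) xs := by
  induction xs with
  | nil => intro s; simp [fPrefixGo, fDiffGo, fAltGo]
  | cons y ys ih =>
      intro s
      simp only [fPrefixGo, List.map, fDiffGo, fAltGo]
      show (PySem.Int.floordiv (s + y) m - PySem.Int.floordiv s m) :: _ = _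
      rw [show PySem.Int.floordiv = Int.fdiv from rfl, show PySem.Int.mod = Int.fmod from rfl] at *
      rw [fdiv_shift s y m hm]
      refine congrArg _ ?_
      rw [← fmod_shift s y m]; exact ih (s + y)

-- ===== VERDICT (by name: the statement is the Claim_ definition above) =====
theorem f_spec : Claim_equal_f := by
  intro l m _ hpre
  unfold Spec_f f f_alt
  cases l with
  | nil => simp [fPrefix, fDiff, fAltGo]
  | cons x xs =>
      have hm : m ≠ 0 := by
        rcases hpre with h | h
        · simp at h
        · exact h
      simp only [fPrefix, List.map, fDiff, fAltGo]
      have h := f_go_eq m hm xs x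
      have hx : (0 : Int) + x = x := by ring
      rw [hx]
      exact congrArg _ h
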